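-- pv_equiv track=rewrite | github.com/bobcorn/openfoodfacts-data-quality | app/report/legacy_source.py | _sanitize_placeholder_segment
-- ===== SOURCE A (Python) =====
-- def _sanitize_placeholder_segment(segment: str) -> str:
--     """Return one identifier-safe token derived from a Perl expression fragment."""
--     normalized = "".join(
--         character if character.isalnum() or character == "_" else "_"
--         for character in segment
--     ).strip("_")
--     while "__" in normalized:
--         normalized = normalized.replace("__", "_")
--     return normalized
-- ===== SOURCE B (Python) =====
-- def _sanitize_placeholder_segment(segment: str) -> str:
--     """Return one identifier-safe token derived from a Perl expression fragment."""
--     tokens = []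
--     current = []
--     for character in segment:
--         if character.isalnum():
--             current.append(character)
--         else:
--             if current:
--                 tokens.append("".join(current))
--             current = []
--     if current:
--         tokens.append("".join(current))
--     return "_".join(tokens)
-- ===== Notes on version B (the rewrite author's own statement) =====
-- stated objective: alternative
-- what changed: Replaces A's pipeline (blur every non-identifier character to an underscore, strip edge underscores, then repeatedly collapse doubled underscores until none remain) by a single left-to-right scan that groups maximal alnum runs into tokens and joins the tokens with single underscores.
import Mathlib
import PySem

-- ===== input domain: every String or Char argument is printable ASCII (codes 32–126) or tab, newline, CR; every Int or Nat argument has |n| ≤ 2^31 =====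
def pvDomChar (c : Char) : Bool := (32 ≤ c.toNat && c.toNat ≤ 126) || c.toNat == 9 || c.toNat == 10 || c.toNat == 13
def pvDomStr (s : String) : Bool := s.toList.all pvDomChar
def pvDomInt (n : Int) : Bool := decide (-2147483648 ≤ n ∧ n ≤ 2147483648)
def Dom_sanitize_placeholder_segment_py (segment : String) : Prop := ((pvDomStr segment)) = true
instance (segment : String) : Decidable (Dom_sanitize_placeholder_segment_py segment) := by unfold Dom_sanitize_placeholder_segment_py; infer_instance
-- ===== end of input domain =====

-- B replaces A's blur-to-'_' + strip('_') + repeated replace("__","_") loop by one scan grouping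
-- maximal alnum runs joined with '_' (objective: alternative single-pass algorithm, same results).

-- ===== PORT A =====
-- pvRepl is a step-for-step spec of one `replace(s, "__", "_")` pass; it is needed ABOVE the port
-- because the port's while-loop termination cites pvRepl_length_lt / pvReplace_eq by name.
def pvRepl : List Char → List Char
  | [] => []
  | [c] => [c]
  | c :: d :: t => if c = '_' ∧ d = '_' then '_' :: pvRepl t else c :: pvRepl (d :: t)

theorem pvRepl_length_le (s : List Char) : (pvRepl s).length ≤ s.length := by
  fun_induction pvRepl s with
  | case1 => simp
  | case2 c => simp
  | case3 c d t h ih => simp only [List.length_cons]; omega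
  | case4 c d t h ih => simp only [List.length_cons] at ih ⊢; omega

theorem pvRepl_length_lt (s : List Char) (h : ['_', '_'] <:+: s) :
    (pvRepl s).length < s.length := by
  fun_induction pvRepl s with
  | case1 => simp at h
  | case2 c =>
      have := h.sublist.length_le
      simp at this
  | case3 c d t hcd ih =>
      have := pvRepl_length_le t
      simp only [List.length_cons]
      omega
  | case4 c d t hcd ih =>
      have h' : ['_', '_'] <:+: d :: t := by
        rcases (List.infix_cons_iff).mp h with hpre | htail
        · obtain ⟨h1, h2⟩ := List.cons_prefix_cons.mp hpre
          obtain ⟨h3, -⟩ := List.cons_prefix_cons.mp h2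
          exact absurd ⟨h1.symm, h3.symm⟩ hcd
        · exact htail
      have := ih h'
      simp only [List.length_cons] at this ⊢
      omega

theorem pvReplace_go_eq : ∀ (fuel : Nat) (l acc : List Char), l.length ≤ fuel →
    PySem.Chars.replace.go ['_', '_'] ['_'] fuel l acc = acc.reverse ++ pvRepl l := by
  intro fuel
  induction fuel with
  | zero =>
      intro l acc hl
      have : l = [] := by cases l <;> simp_all
      subst this
      rw [PySem.Chars.replace.go.eq_def]; simp [pvRepl]
  | succ n ih =>
      intro l acc hl
      match l with
      | [] => rw [PySem.Chars.replace.go.eq_def]; simp [pvRepl]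
      | c :: t =>
          have hstep : PySem.Chars.replace.go ['_', '_'] ['_'] (n + 1) (c :: t) acc
              = if ['_', '_'].isPrefixOf (c :: t) = true then
                  PySem.Chars.replace.go ['_', '_'] ['_'] n
                    (List.drop (['_', '_'] : List Char).length (c :: t)) ((['_'] : List Char).reverse ++ acc)
                else PySem.Chars.replace.go ['_', '_'] ['_'] n t (c :: acc) := rfl
          rw [hstep]
          by_cases hp : ['_', '_'].isPrefixOf (c :: t) = true
          · have hpre := List.isPrefixOf_iff_prefix.mp hp
            have h1 := List.cons_prefix_cons.mp hpre
            obtain ⟨t', ht'⟩ : ∃ t', t = '_' :: t' := by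
              cases t with
              | nil => simp at h1
              | cons d t' =>
                  have h2 := List.cons_prefix_cons.mp h1.2
                  exact ⟨t', by rw [h2.1]⟩
            subst ht'
            have hc : c = '_' := h1.1.symm
            subst hc
            rw [if_pos hp]
            rw [show List.drop (['_', '_'] : List Char).length ('_' :: '_' :: t') = t' from rfl,
              show (['_'] : List Char).reverse ++ acc = '_' :: acc from rfl,
              ih t' (('_' : Char) :: acc) (by simp at hl; omega)]
            rw [show pvRepl ('_' :: '_' :: t') = '_' :: pvRepl t' from by
              rw [pvRepl, if_pos ⟨rfl, rfl⟩]]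
            simp
          · rw [if_neg hp]
            rw [ih t (c :: acc) (by simp at hl; omega)]
            have : pvRepl (c :: t) = c :: pvRepl t := by
              cases t with
              | nil => simp [pvRepl]
              | cons d t' =>
                  rw [pvRepl]
                  rw [if_neg]
                  intro ⟨h1, h2⟩
                  subst h1; subst h2
                  simp [List.isPrefixOf] at hp
            rw [this]; simp
  
theorem pvReplace_eq (s : List Char) :
    PySem.Chars.replace s ['_', '_'] ['_'] = pvRepl s := by
  rw [PySem.Chars.replace, if_neg (by simp)]
  exact pvReplace_go_eq s.length s [] (le_refl _)

-- the `while "__" in normalized: normalized = normalized.replace("__","_")` loop of A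
def sppCollapseLoop (s : List Char) : List Char :=
  if h : PySem.Chars.isIn ['_', '_'] s = true then
    sppCollapseLoop (PySem.Chars.replace s ['_', '_'] ['_'])
  else s
termination_by s.length
decreasing_by
  rw [pvReplace_eq]
  exact pvRepl_length_lt s ((PySem.Chars.isIn_iff_infix _ _).mp h)

def sanitize_placeholder_segment_py (segment : String) : String :=
  String.mk (sppCollapseLoop (PySem.Chars.stripChars
    (PySem.Chars.join []
      (segment.toList.map (fun c => if PySem.Chars.isalnum c || c == '_' then [c] else ['_'])))
    ['_']))

-- ===== PORT B =====
-- one step of B's scan: extend the current alnum buffer, or flush it on a non-alnum character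
def sppStep (st : List (List Char) × List Char) (c : Char) : List (List Char) × List Char :=
  if PySem.Chars.isalnum c then (st.1, st.2 ++ [c])
  else if st.2 = [] then (st.1, []) else (st.1 ++ [st.2], [])

def sanitize_placeholder_segment_py_alt (segment : String) : String :=
  let st := segment.toList.foldl sppStep ([], [])
  let toks := if st.2 = [] then st.1 else st.1 ++ [st.2]
  String.mk (PySem.Chars.join ['_'] toks)

-- ===== PRECONDITION & SPEC =====
def Spec_sanitize_placeholder_segment_py (segment : String) (out : String) : Prop := out = sanitize_placeholder_segment_py_alt segment
instance (segment : String) (out : String) : Decidable (Spec_sanitize_placeholder_segment_py segment out) := by unfold Spec_sanitize_placeholder_segment_py; infer_instance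

-- ===== CLAIM (what is proved, stated in full; the proofs are below) =====
def Claim_equal_sanitize_placeholder_segment_py : Prop := ∀ (segment : String), Dom_sanitize_placeholder_segment_py segment → Spec_sanitize_placeholder_segment_py segment (sanitize_placeholder_segment_py segment)

-- ===== LEMMAS AND PROOFS =====

-- abbreviation used throughout the proofs
def pvAl (c : Char) : Bool := PySem.Chars.isalnum c

-- the per-character blur A applies before stripping
def pvF (c : Char) : Char := if pvAl c then c else '_'

-- one-pass spec of A's collapse loop: squash every maximal run of '_' to a single '_'
def pvCollapse : List Char → List Char
  | [] => []
  | c :: t =>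
    if c = '_' then '_' :: pvCollapse (t.dropWhile (fun d => d == '_'))
    else c :: pvCollapse t
termination_by s => s.length
decreasing_by
  · exact Nat.lt_succ_of_le (List.length_dropWhile_le _ _)
  · exact Nat.lt_succ_self _

-- spec of B's token list: the maximal alnum runs of the input
def pvTokens : List Char → List (List Char)
  | [] => []
  | c :: t =>
    if pvAl c then (c :: t.takeWhile pvAl) :: pvTokens (t.dropWhile pvAl)
    else pvTokens t
termination_by s => s.length
decreasing_by
  · exact Nat.lt_succ_of_le (List.length_dropWhile_le _ _)
  · exact Nat.lt_succ_self _

def pvFlush (st : List (List Char) × List Char) : List (List Char) :=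
  if st.2 = [] then st.1 else st.1 ++ [st.2]

def pvFinish (cur cs : List Char) : List (List Char) :=
  if cur = [] then pvTokens cs
  else (cur ++ cs.takeWhile pvAl) :: pvTokens (cs.dropWhile pvAl)

def pvTrim (cs : List Char) : List Char :=
  (((cs.dropWhile (fun c => !pvAl c)).reverse.dropWhile (fun c => !pvAl c))).reverse

-- ---- small facts ----

theorem pvAl_ne_underscore {c : Char} (h : pvAl c = true) : c ≠ '_' := by
  intro hc; subst hc; exact absurd h (by decide)

theorem pvHeadDrop (p : Char → Bool) : ∀ (l : List Char) (c : Char),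
    (l.dropWhile p).head? = some c → p c = false := by
  intro l
  induction l with
  | nil => intro c h; simp at h
  | cons x t ih =>
      intro c h
      by_cases hx : p x = true
      · rw [List.dropWhile_cons_of_pos hx] at h; exact ih c h
      · rw [List.dropWhile_cons_of_neg hx] at h
        simp at h
        subst h
        simpa using hx

-- ---- the B side: fold with buffer = token spec ----

theorem pvFinish_alnum {c : Char} (h : pvAl c = true) (cur t : List Char) :
    pvFinish cur (c :: t) = pvFinish (cur ++ [c]) t := by
  unfold pvFinish
  by_cases hcur : cur = []
  · subst hcur
    simp only [if_neg (by simp : ¬([] ++ [c] = ([] : List Char)))]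
    rw [pvTokens]
    simp [h]
  · simp only [if_neg hcur, if_neg (by simp [hcur] : ¬(cur ++ [c] = []))]
    rw [List.takeWhile_cons_of_pos h, List.dropWhile_cons_of_pos h]
    simp

theorem pvFinish_not_alnum {c : Char} (h : pvAl c = false) (cur t : List Char) :
    pvFinish cur (c :: t) = (if cur = [] then [] else [cur]) ++ pvTokens t := by
  unfold pvFinish
  by_cases hcur : cur = []
  · subst hcur
    rw [pvTokens]
    simp [h]
  · simp only [if_neg hcur]
    rw [List.takeWhile_cons_of_neg (by simp [h]), List.dropWhile_cons_of_neg (by simp [h])]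
    rw [pvTokens]
    simp [h]

theorem pvFold_eq : ∀ (cs : List Char) (toks : List (List Char)) (cur : List Char),
    pvFlush (cs.foldl sppStep (toks, cur)) = toks ++ pvFinish cur cs := by
  intro cs
  induction cs with
  | nil =>
      intro toks cur
      unfold pvFlush pvFinish
      by_cases hcur : cur = [] <;> simp [hcur, pvTokens]
  | cons c t ih =>
      intro toks cur
      rw [List.foldl_cons]
      by_cases hc : pvAl c = true
      · have : sppStep (toks, cur) c = (toks, cur ++ [c]) := by simp [sppStep, pvAl] at hc ⊢; simp [hc]
        rw [this, ih, pvFinish_alnum hc]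
      · have hc' : pvAl c = false := by simpa using hc
        have : sppStep (toks, cur) c = ((if cur = [] then toks else toks ++ [cur]), []) := by
          simp only [sppStep]
          rw [if_neg (by simp [pvAl] at hc'; simp [hc'])]
          by_cases hcur : cur = [] <;> simp [hcur]
        rw [this, ih, pvFinish_not_alnum hc']
        by_cases hcur : cur = [] <;> simp [hcur, pvFinish]

theorem pvAlt_eq (segment : String) :
    sanitize_placeholder_segment_py_alt segment
      = String.mk (PySem.Chars.join ['_'] (pvTokens segment.toList)) := by
  show String.mk (PySem.Chars.join ['_'] (pvFlush (segment.toList.foldl sppStep ([], [])))) = _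
  rw [pvFold_eq]
  simp [pvFinish]

-- ---- the A side: blur / strip / collapse ----

theorem pvBlur_eq (cs : List Char) :
    PySem.Chars.join [] (cs.map (fun c => if PySem.Chars.isalnum c || c == '_' then [c] else ['_']))
      = cs.map pvF := by
  have h : cs.map (fun c => if PySem.Chars.isalnum c || c == '_' then [c] else ['_'])
      = (cs.map pvF).map (fun c => [c]) := by
    rw [List.map_map]
    apply List.map_congr_left
    intro c _
    by_cases hc : PySem.Chars.isalnum c = true
    · simp [hc, pvF, pvAl]
    · by_cases hu : c = '_'
      · subst hu; simp [pvF, pvAl, hc]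
      · simp [pvF, pvAl, hc, hu]
  rw [h, PySem.Chars.join_nil_singletons]

theorem pvContains_pvF (c : Char) : (['_'] : List Char).contains (pvF c) = !pvAl c := by
  by_cases hc : pvAl c = true
  · simp [pvF, hc]
    exact pvAl_ne_underscore hc
  · simp at hc
    simp [pvF, hc]

theorem pvBlurDrop (l : List Char) :
    (l.map pvF).dropWhile (fun c => (['_'] : List Char).contains c)
      = (l.dropWhile (fun c => !pvAl c)).map pvF := by
  induction l with
  | nil => simp
  | cons c t ih =>
      by_cases hc : pvAl c = true
      · rw [List.map_cons,
          List.dropWhile_cons_of_neg (by rw [pvContains_pvF]; simp [hc]),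
          List.dropWhile_cons_of_neg (by simp [hc])]
        simp
      · have hc' : pvAl c = false := by simpa using hc
        rw [List.map_cons,
          List.dropWhile_cons_of_pos (by rw [pvContains_pvF]; simp [hc']),
          List.dropWhile_cons_of_pos (by simp [hc'])]
        exact ih

theorem pvStripBlur (cs : List Char) :
    PySem.Chars.stripChars (cs.map pvF) ['_'] = (pvTrim cs).map pvF := by
  show (List.dropWhile (fun c => (['_'] : List Char).contains c)
      (List.dropWhile (fun c => (['_'] : List Char).contains c) (cs.map pvF)).reverse).reverse
    = (pvTrim cs).map pvF
  rw [pvBlurDrop, ← List.map_reverse, pvBlurDrop, ← List.map_reverse, pvTrim]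

-- ---- collapse loop = pvCollapse ----

theorem pvRepl_cons_ne {c : Char} (h : c ≠ '_') (t : List Char) :
    pvRepl (c :: t) = c :: pvRepl t := by
  cases t with
  | nil => simp [pvRepl]
  | cons d t' => rw [pvRepl, if_neg (by intro ⟨h1, _⟩; exact h h1)]

theorem pvCollapse_cons_ne {c : Char} (h : c ≠ '_') (t : List Char) :
    pvCollapse (c :: t) = c :: pvCollapse t := by
  rw [pvCollapse, if_neg h]

theorem pvDropURun : ∀ (m : Nat) (z : List Char), (∀ c ∈ z.head?, c ≠ '_') →
    (List.replicate m '_' ++ z).dropWhile (fun d => d == '_') = z := by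
  intro m
  induction m with
  | zero =>
      intro z hz
      cases z with
      | nil => simp
      | cons x t =>
          have := hz x (by simp)
          simp only [List.replicate_zero, List.nil_append]
          rw [List.dropWhile_cons_of_neg (by simp [this])]
  | succ n ih =>
      intro z hz
      rw [List.replicate_succ, List.cons_append,
        List.dropWhile_cons_of_pos (by simp)]
      exact ih z hz

theorem pvCollapse_run {a : Nat} (ha : 1 ≤ a) (z : List Char) (hz : ∀ c ∈ z.head?, c ≠ '_') :
    pvCollapse (List.replicate a '_' ++ z) = '_' :: pvCollapse z := by
  obtain ⟨m, rfl⟩ : ∃ m, a = m + 1 := ⟨a - 1, by omega⟩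
  rw [List.replicate_succ, List.cons_append, pvCollapse, if_pos rfl, pvDropURun m z hz]

theorem pvRepl_run : ∀ (a : Nat) (z : List Char), (∀ c ∈ z.head?, c ≠ '_') →
    pvRepl (List.replicate a '_' ++ z) = List.replicate ((a + 1) / 2) '_' ++ pvRepl z := by
  intro a
  induction a using Nat.strong_induction_on with
  | _ a ih =>
      intro z hz
      match a with
      | 0 => simp
      | 1 =>
          simp only [List.replicate_one, List.cons_append, List.nil_append]
          cases z with
          | nil => simp [pvRepl]
          | cons x t =>
              have hx := hz x (by simp)
              rw [pvRepl, if_neg (by intro ⟨_, h2⟩; exact hx h2)]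
              simp
      | (m + 2) =>
          rw [show (m + 2) = (m + 1) + 1 from rfl, List.replicate_succ, List.replicate_succ,
            List.cons_append, List.cons_append, pvRepl, if_pos ⟨rfl, rfl⟩,
            ih m (by omega) z hz]
          have : (m + 2 + 1) / 2 = (m + 1) / 2 + 1 := by omega
          rw [this, List.replicate_succ, List.cons_append]

theorem pvRepl_head (z : List Char) (hz : ∀ c ∈ z.head?, c ≠ '_') :
    ∀ c ∈ (pvRepl z).head?, c ≠ '_' := by
  cases z with
  | nil => simp [pvRepl]
  | cons x t =>
      have hx := hz x (by simp)
      rw [pvRepl_cons_ne hx]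
      intro c hc
      simp at hc
      subst hc
      exact hx

theorem pvCollapse_repl : ∀ (n : Nat) (s : List Char), s.length ≤ n →
    pvCollapse (pvRepl s) = pvCollapse s := by
  intro n
  induction n with
  | zero =>
      intro s hs
      have : s = [] := by cases s <;> simp_all
      subst this; simp [pvRepl]
  | succ n ih =>
      intro s hs
      match s with
      | [] => simp [pvRepl]
      | c :: t =>
          by_cases hc : c = '_'
          · subst hc
            have hd : ('_' :: t) = List.replicate ((('_' :: t).takeWhile (fun d => d == '_')).length) '_'
                ++ ('_' :: t).dropWhile (fun d => d == '_') := by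
              conv_lhs => rw [← List.takeWhile_append_dropWhile (p := fun d => d == '_') (l := '_' :: t)]
              congr 1
              apply List.eq_replicate_of_mem
              intro x hx
              have := List.mem_takeWhile_imp hx
              simpa using this
            set a := (('_' :: t).takeWhile (fun d => d == '_')).length with ha_def
            set z := ('_' :: t).dropWhile (fun d => d == '_') with hz_def
            have ha : 1 ≤ a := by
              rw [ha_def]
              rw [List.takeWhile_cons_of_pos (by simp)]
              simp
            have hz : ∀ x ∈ z.head?, x ≠ '_' := by
              intro x hx
              have := pvHeadDrop (fun d => d == '_') ('_' :: t) x (by rw [← hz_def]; exact hx)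
              simpa using this
            have hzlen : z.length ≤ n := by
              have : z = t.dropWhile (fun d => d == '_') := by
                rw [hz_def, List.dropWhile_cons_of_pos (by simp)]
              rw [this]
              have := List.length_dropWhile_le (fun d => d == '_') t
              simp at hs; omega
            rw [hd, pvRepl_run a z hz,
              pvCollapse_run (by omega) (pvRepl z) (pvRepl_head z hz),
              pvCollapse_run ha z hz, ih z hzlen]
          · rw [pvRepl_cons_ne hc, pvCollapse_cons_ne hc, pvCollapse_cons_ne hc,
              ih t (by simp at hs; omega)]

theorem pvCollapse_no_infix : ∀ (n : Nat) (s : List Char), s.length ≤ n →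
    ¬ (['_', '_'] <:+: s) → pvCollapse s = s := by
  intro n
  induction n with
  | zero =>
      intro s hs _
      have : s = [] := by cases s <;> simp_all
      subst this; simp [pvCollapse]
  | succ n ih =>
      intro s hs hinf
      match s with
      | [] => simp [pvCollapse]
      | c :: t =>
          have ht : ¬ (['_', '_'] <:+: t) := fun h => hinf (h.trans (List.suffix_cons c t).isInfix)
          by_cases hc : c = '_'
          · subst hc
            cases t with
            | nil => simp [pvCollapse]
            | cons d t' =>
                have hd : d ≠ '_' := by
                  intro hd; subst hd
                  exact hinf (List.IsPrefix.isInfix ⟨t', rfl⟩)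
                rw [pvCollapse, if_pos rfl,
                  List.dropWhile_cons_of_neg (by simp [hd]),
                  ih (d :: t') (by simp at hs ⊢; omega) ht]
          · rw [pvCollapse_cons_ne hc, ih t (by simp at hs; omega) ht]

theorem pvLoop_eq (s : List Char) : sppCollapseLoop s = pvCollapse s := by
  fun_induction sppCollapseLoop s with
  | case1 s h ih =>
      rw [ih, pvReplace_eq]
      exact pvCollapse_repl s.length s (le_refl _)
  | case2 s h =>
      have : ¬ (['_', '_'] <:+: s) := by
        rw [← PySem.Chars.isIn_iff_infix]
        simp [h]
      exact (pvCollapse_no_infix s.length s (le_refl _) this).symm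

theorem pvA_eq (segment : String) :
    sanitize_placeholder_segment_py segment
      = String.mk (pvCollapse ((pvTrim segment.toList).map pvF)) := by
  unfold sanitize_placeholder_segment_py
  rw [pvBlur_eq, pvStripBlur, pvLoop_eq]

-- ---- tokens are invariant under trimming non-alnum ends ----

theorem pvTokens_all_na : ∀ (l : List Char), (∀ c ∈ l, pvAl c = false) → pvTokens l = [] := by
  intro l
  induction l with
  | nil => simp [pvTokens]
  | cons c t ih =>
      intro h
      rw [pvTokens, if_neg (by simp [h c (by simp)])]
      exact ih (fun x hx => h x (by simp [hx]))

theorem pvTakeWhile_append_na (junk : List Char) (hj : ∀ c ∈ junk, pvAl c = false) :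
    ∀ (t : List Char), (t ++ junk).takeWhile pvAl = t.takeWhile pvAl := by
  intro t
  induction t with
  | nil =>
      cases junk with
      | nil => simp
      | cons j js =>
          simp only [List.nil_append, List.takeWhile_nil]
          rw [List.takeWhile_cons_of_neg (by simp [hj j (by simp)])]
  | cons c t ih =>
      by_cases hc : pvAl c = true
      · rw [List.cons_append, List.takeWhile_cons_of_pos hc, List.takeWhile_cons_of_pos hc, ih]
      · rw [List.cons_append, List.takeWhile_cons_of_neg hc, List.takeWhile_cons_of_neg hc]

theorem pvDropWhile_append_na (junk : List Char) (hj : ∀ c ∈ junk, pvAl c = false) :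
    ∀ (t : List Char), (t ++ junk).dropWhile pvAl = t.dropWhile pvAl ++ junk := by
  intro t
  induction t with
  | nil =>
      cases junk with
      | nil => simp
      | cons j js =>
          simp only [List.nil_append, List.dropWhile_nil]
          rw [List.dropWhile_cons_of_neg (by simp [hj j (by simp)])]
  | cons c t ih =>
      by_cases hc : pvAl c = true
      · rw [List.cons_append, List.dropWhile_cons_of_pos hc, List.dropWhile_cons_of_pos hc, ih]
      · rw [List.cons_append, List.dropWhile_cons_of_neg hc, List.dropWhile_cons_of_neg hc]
        simp

theorem pvTokens_append_na : ∀ (n : Nat) (e junk : List Char), e.length ≤ n →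
    (∀ c ∈ junk, pvAl c = false) → pvTokens (e ++ junk) = pvTokens e := by
  intro n
  induction n with
  | zero =>
      intro e junk he hj
      have : e = [] := by cases e <;> simp_all
      subst this
      simp only [List.nil_append, pvTokens]
      exact pvTokens_all_na junk hj
  | succ n ih =>
      intro e junk he hj
      match e with
      | [] =>
          simp only [List.nil_append]
          rw [pvTokens_all_na junk hj]; simp [pvTokens]
      | c :: t =>
          by_cases hc : pvAl c = true
          · rw [List.cons_append, pvTokens, if_pos hc, pvTokens, if_pos hc,
              pvTakeWhile_append_na junk hj t, pvDropWhile_append_na junk hj t,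
              ih (t.dropWhile pvAl) junk
                (by have := List.length_dropWhile_le pvAl t; simp at he; omega) hj]
          · rw [List.cons_append, pvTokens, if_neg (by simp [hc]), pvTokens, if_neg (by simp [hc]),
              ih t junk (by simp at he; omega) hj]

theorem pvTokens_na_prefix : ∀ (u z : List Char), (∀ c ∈ u, pvAl c = false) →
    pvTokens (u ++ z) = pvTokens z := by
  intro u
  induction u with
  | nil => simp
  | cons c t ih =>
      intro z h
      rw [List.cons_append, pvTokens, if_neg (by simp [h c (by simp)])]
      exact ih z (fun x hx => h x (by simp [hx]))

theorem pvTokens_trim (cs : List Char) : pvTokens cs = pvTokens (pvTrim cs) := by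
  have h1 : pvTokens cs = pvTokens (cs.dropWhile (fun c => !pvAl c)) := by
    conv_lhs => rw [← List.takeWhile_append_dropWhile (p := fun c => !pvAl c) (l := cs)]
    apply pvTokens_na_prefix
    intro c hc
    have := List.mem_takeWhile_imp hc
    simpa using this
  set d := cs.dropWhile (fun c => !pvAl c) with hd
  have h2 : d = pvTrim cs ++ (d.reverse.takeWhile (fun c => !pvAl c)).reverse := by
    unfold pvTrim
    rw [← hd, ← List.reverse_append, List.takeWhile_append_dropWhile, List.reverse_reverse]
  rw [h1, h2]
  exact pvTokens_append_na (pvTrim cs).length _ _ (le_refl _) (by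
    intro c hc
    have := List.mem_takeWhile_imp (List.mem_reverse.mp hc)
    simpa using this)

-- head and last of pvTrim are alnum
theorem pvTrim_head (cs : List Char) : ∀ c ∈ (pvTrim cs).head?, pvAl c = true := by
  intro c hc
  unfold pvTrim at hc
  set d := cs.dropWhile (fun c => !pvAl c) with hd
  set w := d.reverse.dropWhile (fun c => !pvAl c) with hw
  rw [List.head?_reverse] at hc
  have hsplit : d.reverse = d.reverse.takeWhile (fun c => !pvAl c) ++ w := by
    rw [hw, List.takeWhile_append_dropWhile]
  have hc' : w.getLast? = some c := Option.mem_def.mp hc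
  have hlast : d.reverse.getLast? = some c := by
    rw [hsplit, List.getLast?_append, hc']
    rfl
  rw [List.getLast?_reverse] at hlast
  have := pvHeadDrop (fun c => !pvAl c) cs c (by rw [← hd]; exact hlast)
  simpa using this

theorem pvTrim_last (cs : List Char) : ∀ c ∈ (pvTrim cs).getLast?, pvAl c = true := by
  intro c hc
  unfold pvTrim at hc
  rw [List.getLast?_reverse] at hc
  have := pvHeadDrop (fun c => !pvAl c) _ c hc
  simpa using this

-- ---- the main correspondence on trimmed input ----

theorem pvMapF_id (r : List Char) (h : ∀ c ∈ r, pvAl c = true) : r.map pvF = r := by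
  induction r with
  | nil => simp
  | cons c t ih =>
      rw [List.map_cons, ih (fun x hx => h x (by simp [hx]))]
      simp [pvF, h c (by simp)]

theorem pvMapF_replicate (u : List Char) (h : ∀ c ∈ u, pvAl c = false) :
    u.map pvF = List.replicate u.length '_' := by
  induction u with
  | nil => simp
  | cons c t ih =>
      rw [List.map_cons, List.length_cons, List.replicate_succ]
      rw [ih (fun x hx => h x (by simp [hx]))]
      simp [pvF, h c (by simp)]

theorem pvCollapse_append (r : List Char) (hr : ∀ c ∈ r, c ≠ '_') (w : List Char) :
    pvCollapse (r ++ w) = r ++ pvCollapse w := by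
  induction r with
  | nil => simp
  | cons c t ih =>
      rw [List.cons_append, pvCollapse_cons_ne (hr c (by simp)),
        ih (fun x hx => hr x (by simp [hx]))]
      simp

theorem pvNoUnderscore_no_infix (s : List Char) (h : ∀ c ∈ s, c ≠ '_') :
    ¬ (['_', '_'] <:+: s) := by
  intro hinf
  have : '_' ∈ s := hinf.sublist.mem (by simp)
  exact h '_' this rfl

theorem pvJoin_single (r : List Char) : PySem.Chars.join ['_'] [r] = r := by
  simp [PySem.Chars.join, List.intercalate]

theorem pvMain : ∀ (n : Nat) (cs : List Char), cs.length ≤ n →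
    (∀ c ∈ cs.head?, pvAl c = true) → (∀ c ∈ cs.getLast?, pvAl c = true) →
    pvCollapse (cs.map pvF) = PySem.Chars.join ['_'] (pvTokens cs) := by
  intro n
  induction n with
  | zero =>
      intro cs h _ _
      have : cs = [] := by cases cs <;> simp_all
      subst this
      simp [pvCollapse, pvTokens]
  | succ n ih =>
      intro cs hlen hh hl
      match cs with
      | [] => simp [pvCollapse, pvTokens]
      | c :: t =>
          have hc : pvAl c = true := hh c (by simp)
          set r : List Char := c :: t.takeWhile pvAl with hr_def
          set rest : List Char := t.dropWhile pvAl with hrest_def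
          have hcs : c :: t = r ++ rest := by
            rw [hr_def, hrest_def, List.cons_append, List.takeWhile_append_dropWhile]
          have hrP : ∀ x ∈ r, pvAl x = true := by
            intro x hx
            rw [hr_def] at hx
            rcases List.mem_cons.mp hx with h' | h'
            · subst h'; exact hc
            · exact List.mem_takeWhile_imp h'
          have hrU : ∀ x ∈ r, x ≠ '_' := fun x hx => pvAl_ne_underscore (hrP x hx)
          have tokens_cons : pvTokens (c :: t) = r :: pvTokens rest := by
            rw [pvTokens, if_pos hc]
          by_cases hrest : rest = []
          · have hcr : c :: t = r := by rw [hcs, hrest, List.append_nil]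
            rw [tokens_cons, hrest]
            rw [show pvTokens ([] : List Char) = [] from by rw [pvTokens]]
            rw [pvJoin_single, hcr, pvMapF_id r hrP]
            exact pvCollapse_no_infix r.length r (le_refl _) (pvNoUnderscore_no_infix r hrU)
          · have hrhead : ∀ x ∈ rest.head?, pvAl x = false := by
              intro x hx
              have := pvHeadDrop pvAl t x (by rw [← hrest_def]; exact hx)
              exact this
            have hlast_rest : ∀ x ∈ rest.getLast?, pvAl x = true := by
              intro x hx
              apply hl
              rw [hcs, List.getLast?_append]
              rw [Option.mem_def] at hx ⊢
              rw [hx]; rfl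
            set u : List Char := rest.takeWhile (fun x => !pvAl x) with hu_def
            set z : List Char := rest.dropWhile (fun x => !pvAl x) with hz_def
            have hrest_eq : rest = u ++ z := by
              rw [hu_def, hz_def, List.takeWhile_append_dropWhile]
            have huNA : ∀ x ∈ u, pvAl x = false := by
              intro x hx
              have := List.mem_takeWhile_imp (hu_def ▸ hx)
              simpa using this
            have hu_len : 1 ≤ u.length := by
              cases hre : rest with
              | nil => exact absurd hre hrest
              | cons x rs =>
                  have hx : pvAl x = false := hrhead x (by rw [hre]; simp)
                  rw [hu_def, hre, List.takeWhile_cons_of_pos (by simp [hx])]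
                  simp
            have hzhead : ∀ x ∈ z.head?, pvAl x = true := by
              intro x hx
              have := pvHeadDrop (fun x => !pvAl x) rest x (by rw [← hz_def]; exact hx)
              simpa using this
            have hzne : z ≠ [] := by
              intro hz0
              have hru : rest = u := by rw [hrest_eq, hz0, List.append_nil]
              have hlast := List.getLast?_eq_getLast hrest
              have h1 := hlast_rest (rest.getLast hrest) (by simp [hlast])
              have h2 := huNA (rest.getLast hrest) (hru ▸ List.getLast_mem hrest)
              simp [h1] at h2
            have hzlast : ∀ x ∈ z.getLast?, pvAl x = true := by
              intro x hx
              apply hlast_rest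
              rw [hrest_eq, List.getLast?_append]
              rw [Option.mem_def] at hx ⊢
              rw [hx]; rfl
            have hzlen : z.length ≤ n := by
              have h1 := List.length_dropWhile_le (fun x => !pvAl x) rest
              have h2 := List.length_dropWhile_le pvAl t
              simp at hlen
              rw [hz_def]; rw [hrest_def] at h1 ⊢
              omega
            have IH := ih z hzlen hzhead hzlast
            have hz_tokens_ne : ∃ q qs, pvTokens z = q :: qs := by
              cases hze : z with
              | nil => exact absurd hze hzne
              | cons x rs =>
                  have hx : pvAl x = true := hzhead x (by rw [hze]; simp)
                  rw [pvTokens, if_pos hx]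
                  exact ⟨_, _, rfl⟩
            obtain ⟨q, qs, hq⟩ := hz_tokens_ne
            have hmap : (c :: t).map pvF = r ++ (List.replicate u.length '_' ++ z.map pvF) := by
              rw [hcs, hrest_eq, List.map_append, List.map_append,
                pvMapF_id r hrP, pvMapF_replicate u huNA]
            have hzmaphead : ∀ x ∈ (z.map pvF).head?, x ≠ '_' := by
              intro x hx
              cases hze : z with
              | nil => rw [hze] at hx; simp at hx
              | cons y rs =>
                  rw [hze] at hx
                  simp at hx
                  have hy : pvAl y = true := hzhead y (by rw [hze]; simp)
                  rw [← hx, pvF, if_pos hy]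
                  exact pvAl_ne_underscore hy
            rw [hmap, pvCollapse_append r hrU, pvCollapse_run hu_len (z.map pvF) hzmaphead, IH,
              tokens_cons, hrest_eq, pvTokens_na_prefix u z huNA, hq,
              PySem.Chars.join_cons_cons]
            simp

-- ===== VERDICT (by name: the statement is the Claim_ definition above) =====
theorem sanitize_placeholder_segment_py_spec : Claim_equal_sanitize_placeholder_segment_py := by
  intro segment _
  unfold Spec_sanitize_placeholder_segment_py
  rw [pvA_eq, pvAlt_eq, pvTokens_trim]
  rw [pvMain (pvTrim segment.toList).length (pvTrim segment.toList) (le_refl _)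
    (pvTrim_head segment.toList) (pvTrim_last segment.toList)]
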